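-- pv_equiv track=rewrite | github.com/need-singularity/sylvian-singularity | .shared/calc/dfs_n6_composition_miner.py | sieve_rad
-- ===== SOURCE A (Python) =====
-- def sieve_rad(limit):
--     r = [1] * (limit + 1)
--     r[0] = 0
--     spf = list(range(limit + 1))
--     for i in range(2, int(limit**0.5) + 1):
--         if spf[i] == i:
--             for j in range(i*i, limit + 1, i):
--                 if spf[j] == j:
--                     spf[j] = i
--     for n in range(2, limit + 1):
--         m = n
--         seen = set()
--         while m > 1:
--             p = spf[m]
--             if p not in seen:
--                 r[n] *= p
--                 seen.add(p)
--             m //= p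
--     return r
-- ===== SOURCE B (Python) =====
-- def sieve_rad(limit):
--     r = [1] * (limit + 1)
--     r[0] = 0
--     for p in range(2, limit + 1):
--         if r[p] == 1:  # no smaller prime multiplied in yet, so p is prime
--             for j in range(p, limit + 1, p):
--                 r[j] *= p
--     return r
-- ===== Notes on version B (the rewrite author's own statement) =====
-- stated objective: faster
-- what changed: Replaced the smallest-prime-factor sieve plus per-n trial factorization with a seen-set by a single multiplicative sieve that detects each prime p by its table entry still holding the initial value and multiplies p directly into every multiple, removing the inner while-loop factorization entirely.
import Mathlib
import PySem

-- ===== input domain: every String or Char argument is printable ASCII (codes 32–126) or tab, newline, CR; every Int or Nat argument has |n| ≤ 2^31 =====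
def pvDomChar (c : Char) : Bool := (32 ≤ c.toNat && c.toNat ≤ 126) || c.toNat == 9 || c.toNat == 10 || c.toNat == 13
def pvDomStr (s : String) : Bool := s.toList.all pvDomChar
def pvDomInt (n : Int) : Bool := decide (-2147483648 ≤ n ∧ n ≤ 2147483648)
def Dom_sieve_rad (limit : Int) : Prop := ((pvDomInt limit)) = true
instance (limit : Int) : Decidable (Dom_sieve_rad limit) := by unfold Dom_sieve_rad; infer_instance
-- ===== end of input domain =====

-- B replaces A's smallest-prime-factor sieve + per-n trial factorization by a single
-- multiplicative radical sieve (objective: faster, measured).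

-- ===== PORT A =====
-- A's inner while-loop (m //= p until m <= 1). Terminates because m strictly decreases;
-- the '2 ≤ p' guard is for totality only: with the sieve's spf table spf[m] ≥ 2 whenever
-- m ≥ 2, so the else-branch is never reached on inputs admitted by Pre_.  spf[m] and r[n]
-- are read with pyGetD (in range in every reachable state under Pre_).
def sieveRadFactorLoop (spf r : List Int) (n m : Int) (seen : PySem.Set Int) : List Int :=
  if h : 1 < m then
    let p := PySem.List.pyGetD spf m 0
    if hp : 2 ≤ p then
      if PySem.Set.contains seen p then
        sieveRadFactorLoop spf r n (PySem.Int.floordiv m p) seen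
      else
        sieveRadFactorLoop spf
          (PySem.List.pySetD r n (PySem.List.pyGetD r n 0 * p)) n
          (PySem.Int.floordiv m p) (PySem.Set.add seen p)
    else r
  else r
termination_by m.toNat
decreasing_by
  all_goals
    have h2 : PySem.Int.floordiv m p = m / p := PySem.Int.floordiv_eq_ediv_of_pos (by omega)
    have h3 : m / p < m := by rw [Int.ediv_lt_iff_lt_mul (by omega)]; nlinarith
    have h4 : 0 ≤ m / p := Int.ediv_nonneg (by omega) (by omega)
    rw [h2]; omega

-- literal port of A: the ones list with its first entry zeroed (for negative limit the
-- list is empty and the assignment raises IndexError — excluded by Pre_); the spf table;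
-- the spf sieve up to int(limit**0.5), ported as Nat.sqrt (exact on the nonnegative
-- domain admitted here: the float sqrt of such an integer never rounds across an
-- integer); then the per-n factorization loop with a seen set.
def sieve_rad (limit : Int) : List Int :=
  let r := PySem.List.pySetD (List.replicate (limit + 1).toNat (1 : Int)) 0 0
  let spf0 := PySem.List.pyRange 0 (limit + 1) 1
  let spf := (PySem.List.pyRange 2 ((Nat.sqrt limit.toNat : Nat) + (1 : Int)) 1).foldl
    (fun spf i =>
      if PySem.List.pyGetD spf i 0 == i then
        (PySem.List.pyRange (i * i) (limit + 1) i).foldl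
          (fun spf j =>
            if PySem.List.pyGetD spf j 0 == j then PySem.List.pySetD spf j i else spf) spf
      else spf) spf0
  (PySem.List.pyRange 2 (limit + 1) 1).foldl
    (fun r n => sieveRadFactorLoop spf r n n PySem.Set.empty) r

-- ===== PORT B =====
-- literal port of Source B: one multiplicative sieve; an entry still holding its initial
-- value detects a prime p, and every multiple of p is multiplied by p once.
def sieve_rad_alt (limit : Int) : List Int :=
  let r := PySem.List.pySetD (List.replicate (limit + 1).toNat (1 : Int)) 0 0
  (PySem.List.pyRange 2 (limit + 1) 1).foldl
    (fun r p =>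
      if PySem.List.pyGetD r p 0 == 1 then
        (PySem.List.pyRange p (limit + 1) p).foldl
          (fun r j => PySem.List.pySetD r j (PySem.List.pyGetD r j 0 * p)) r
      else r) r

-- ===== PRECONDITION & SPEC =====
-- Pre_ excludes exactly the inputs on which A raises: for negative limit the ones list
-- is empty and assigning its first element raises IndexError (B raises identically there).
def Pre_sieve_rad (limit : Int) : Prop := 0 ≤ limit
instance (limit : Int) : Decidable (Pre_sieve_rad limit) := by unfold Pre_sieve_rad; infer_instance
def pvWitness_sieve_rad : Int := (10)

def Spec_sieve_rad (limit : Int) (out : List Int) : Prop := out = sieve_rad_alt limit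
instance (limit : Int) (out : List Int) : Decidable (Spec_sieve_rad limit out) := by unfold Spec_sieve_rad; infer_instance

-- ===== CLAIM (what is proved, stated in full; the proofs are below) =====
def Claim_equal_sieve_rad : Prop := ∀ (limit : Int), Dom_sieve_rad limit → Pre_sieve_rad limit → Spec_sieve_rad limit (sieve_rad limit)

-- ===== LEMMAS AND PROOFS =====


lemma init_eq (L : Nat) :
    PySem.List.pySetD (List.replicate (L + 1) (1 : Int)) 0 0
      = (List.range (L + 1)).map (fun j => if j = 0 then (0 : Int) else 1) := by
  rw [PySem.List.pySetD_of_nonneg _ _ le_rfl]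
  apply List.ext_getElem (by simp)
  intro i h1 h2
  simp at h1
  rcases Nat.eq_zero_or_pos i with h | h <;> simp [h, List.getElem_set]
  omega

def updStep (c : Int → Int → Bool) (g : Int → Int → Int) (l : List Int) (j : Int) : List Int :=
  if c (PySem.List.pyGetD l j 0) j then PySem.List.pySetD l j (g (PySem.List.pyGetD l j 0) j) else l

lemma length_foldl_updStep (c : Int → Int → Bool) (g : Int → Int → Int) :
    ∀ (js : List Int) (l : List Int), (js.foldl (updStep c g) l).length = l.length := by
  intro js
  induction js with
  | nil => intro l; rfl
  | cons j js ih =>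
    intro l
    simp only [List.foldl_cons, ih]
    unfold updStep
    split <;> simp [PySem.List.length_pySetD]

lemma getD_set_int (l : List Int) (i : Nat) (v : Int) (t : Nat) :
    (l.set i v).getD t 0 = if t = i ∧ t < l.length then v else l.getD t 0 := by
  rw [List.getD_eq_getElem?_getD, List.getD_eq_getElem?_getD, List.getElem?_set]
  split_ifs with h1 h2 h3 <;> simp_all <;> omega

lemma getD_foldl_updStep (c : Int → Int → Bool) (g : Int → Int → Int) :
    ∀ (js : List Int), js.Nodup → ∀ (l : List Int),
      (∀ j ∈ js, 0 ≤ j ∧ j < (l.length : Int)) → ∀ t : Nat,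
      (js.foldl (updStep c g) l).getD t 0 =
        if (t : Int) ∈ js then
          (if c (l.getD t 0) t then g (l.getD t 0) t else l.getD t 0)
        else l.getD t 0 := by
  intro js
  induction js with
  | nil => intro _ l _ t; simp
  | cons j js ih =>
    intro hnd l hmem t
    obtain ⟨hj0, hjlen⟩ := hmem j (by simp)
    have hlen' : (updStep c g l j).length = l.length := by
      unfold updStep; split <;> simp [PySem.List.length_pySetD]
    have hget : PySem.List.pyGetD l j 0 = l.getD j.toNat 0 := by
      rw [PySem.List.pyGetD_eq_getElem l 0 hj0 hjlen, List.getD_eq_getElem l 0 (by omega)]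
    have hstep : ∀ s : Nat, (updStep c g l j).getD s 0 =
        if (s : Int) = j ∧ c (l.getD s 0) j then g (l.getD s 0) j else l.getD s 0 := by
      intro s
      unfold updStep
      rw [hget, PySem.List.pySetD_of_nonneg _ _ hj0]
      by_cases hc : c (l.getD j.toNat 0) j = true
      · rw [if_pos hc, getD_set_int]
        by_cases hs : (s : Int) = j
        · have hsj : s = j.toNat := by omega
          subst hsj
          have hlt : j.toNat < l.length := by omega
          rw [List.getD_eq_getElem l 0 hlt] at hc
          simp [hs, hc, hlt]
        · have hsj : ¬(s = j.toNat) := by omega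
          simp [hs, hsj]
      · rw [if_neg hc]
        by_cases hs : (s : Int) = j
        · have hsj : s = j.toNat := by omega
          subst hsj
          have hlt : j.toNat < l.length := by omega
          rw [List.getD_eq_getElem l 0 hlt] at hc
          simp [hs, hc, hlt]
        · simp [hs]
    simp only [List.foldl_cons]
    rw [ih hnd.of_cons (updStep c g l j) (by rw [hlen']; exact fun x hx => hmem x (by simp [hx])) t]
    by_cases htj : (t : Int) = j
    · have htnot : (t : Int) ∉ js := by rw [htj]; exact (List.nodup_cons.mp hnd).1
      rw [if_neg htnot, hstep t, if_pos (show (t : Int) ∈ j :: js by simp [htj]), htj]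
      by_cases hc : c (l.getD t 0) j = true <;> simp [hc]
    · have h1 : (updStep c g l j).getD t 0 = l.getD t 0 := by rw [hstep]; simp [htj]
      rw [h1]
      by_cases htm : (t : Int) ∈ js <;> simp [htm, htj]

lemma nodup_pyRange_pos (a b : Int) {s : Int} (hs : 0 < s) :
    (PySem.List.pyRange a b s).Nodup := by
  rw [PySem.List.pyRange_of_pos a b hs]
  refine List.Nodup.map ?_ (List.nodup_range)
  intro x y hxy
  have : (x : Int) = y := by
    have := hxy
    nlinarith [hxy]
  exact_mod_cast this

def bM (t j : Nat) : Int :=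
  if j = 0 then 0 else ((∏ q ∈ j.primeFactors.filter (fun q => q ≤ t), q : ℕ) : Int)

lemma filter_le_succ_prod (t j : Nat) (hj : 1 ≤ j) (hp : (t + 1).Prime) :
    (∏ q ∈ j.primeFactors.filter (fun q => q ≤ t + 1), q) =
      (if (t + 1) ∣ j then (t + 1) * ∏ q ∈ j.primeFactors.filter (fun q => q ≤ t), q
       else ∏ q ∈ j.primeFactors.filter (fun q => q ≤ t), q) := by
  split_ifs with hd
  · have hmem : t + 1 ∈ j.primeFactors.filter (fun q => q ≤ t + 1) := by
      simp [Nat.mem_primeFactors, hp, hd]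
      omega
    have hins : j.primeFactors.filter (fun q => q ≤ t + 1)
        = insert (t + 1) (j.primeFactors.filter (fun q => q ≤ t)) := by
      ext q
      simp only [Finset.mem_filter, Finset.mem_insert]
      constructor
      · rintro ⟨hq, hle⟩
        rcases Nat.lt_or_ge q (t + 1) with h | h
        · exact Or.inr ⟨hq, by omega⟩
        · exact Or.inl (by omega)
      · rintro (rfl | ⟨hq, hle⟩)
        · exact ⟨(Finset.mem_filter.mp hmem).1, le_rfl⟩
        · exact ⟨hq, by omega⟩
    rw [hins, Finset.prod_insert (by simp)]
  · apply Finset.prod_congr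
    · ext q
      simp only [Finset.mem_filter, Nat.mem_primeFactors]
      constructor
      · rintro ⟨⟨hq, hqd, hj0⟩, hle⟩
        refine ⟨⟨hq, hqd, hj0⟩, ?_⟩
        rcases Nat.lt_or_ge q (t + 1) with h | h
        · omega
        · exfalso; apply hd; have : q = t + 1 := by omega
          exact this ▸ hqd
      · rintro ⟨hq, hle⟩; exact ⟨hq, by omega⟩
    · intros; rfl

lemma bM_prime_iff (t : Nat) (ht : 1 ≤ t) : bM t (t + 1) = 1 ↔ (t + 1).Prime := by
  unfold bM
  rw [if_neg (by omega)]
  constructor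
  · intro h1
    by_contra hnp
    have h0 : 0 < t + 1 := by omega
    have hpf : (t + 1).minFac.Prime := Nat.minFac_prime (by omega)
    have hsq : (t + 1).minFac ^ 2 ≤ t + 1 := Nat.minFac_sq_le_self h0 hnp
    have hlt : (t + 1).minFac < t + 1 := by nlinarith [hpf.two_le]
    have hmem : (t + 1).minFac ∈ (t + 1).primeFactors.filter (fun q => q ≤ t) := by
      simp [Nat.mem_primeFactors, hpf, Nat.minFac_dvd]
      omega
    have hall : ∀ q ∈ (t + 1).primeFactors.filter (fun q => q ≤ t), 1 ≤ q := by
      intro q hq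
      simp only [Finset.mem_filter, Nat.mem_primeFactors] at hq
      exact hq.1.1.one_lt.le
    have hone := Finset.single_le_prod' hall hmem
    have : 1 < ∏ q ∈ (t + 1).primeFactors.filter (fun q => q ≤ t), q := by
      have := hpf.two_le; omega
    have : ((∏ q ∈ (t + 1).primeFactors.filter (fun q => q ≤ t), q : ℕ) : Int) ≠ 1 := by
      exact_mod_cast Nat.ne_of_gt this
    exact this h1
  · intro hp
    have : (t + 1).primeFactors.filter (fun q => q ≤ t) = ∅ := by
      rw [hp.primeFactors]
      ext q; simp; omega
    simp [this]

lemma map_bM_zero_eq_init (L : Nat) :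
    (List.range (L + 1)).map (fun j => if j = 0 then (0 : Int) else 1)
      = (List.range (L + 1)).map (fun j => bM 1 j) := by
  apply List.map_congr_left
  intro j _
  unfold bM
  rcases Nat.eq_zero_or_pos j with rfl | hj
  · simp
  · rw [if_neg (by omega), if_neg (by omega)]
    have : j.primeFactors.filter (fun q => q ≤ 1) = ∅ := by
      ext q
      simp only [Finset.mem_filter, Nat.mem_primeFactors, Finset.notMem_empty, iff_false]
      rintro ⟨⟨hq, _, _⟩, hle⟩
      have := hq.two_le; omega
    simp [this]

lemma b_phase (L : Nat) : ∀ t : Nat, 1 ≤ t → t ≤ L →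
    (PySem.List.pyRange 2 ((t : Int) + 1) 1).foldl
      (fun r p =>
        if PySem.List.pyGetD r p 0 == 1 then
          (PySem.List.pyRange p ((L : Int) + 1) p).foldl
            (fun r j => PySem.List.pySetD r j (PySem.List.pyGetD r j 0 * p)) r
        else r)
      ((List.range (L + 1)).map (fun j => if j = 0 then (0 : Int) else 1))
    = (List.range (L + 1)).map (fun j => bM t j) := by
  intro t
  induction t with
  | zero => omega
  | succ t ih =>
    intro _ htL
    rcases Nat.eq_zero_or_pos t with rfl | ht
    · -- t + 1 = 1 : empty range
      rw [show ((1 : Nat) : Int) + 1 = 2 by norm_num, PySem.List.pyRange_one_eq_nil le_rfl]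
      exact map_bM_zero_eq_init L
    · -- peel the last iteration p = t + 1
      have hcast : ((t + 1 : Nat) : Int) + 1 = ((t : Int) + 1) + 1 := by push_cast; ring
      rw [hcast, PySem.List.pyRange_one_succ_right (by omega), List.foldl_append,
        ih ht (by omega)]
      set prev := (List.range (L + 1)).map (fun j => bM t j) with hprev
      have hlen : prev.length = L + 1 := by simp [hprev]
      simp only [List.foldl_cons, List.foldl_nil]
      have hp0 : (0 : Int) ≤ (t : Int) + 1 := by omega
      have hplt : (t : Int) + 1 < (prev.length : Int) := by rw [hlen]; push_cast; omega
      have hgets : PySem.List.pyGetD prev ((t : Int) + 1) 0 = bM t (t + 1) := by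
        rw [PySem.List.pyGetD_eq_getElem prev 0 hp0 hplt]
        have htn : ((t : Int) + 1).toNat = t + 1 := by omega
        simp [hprev, htn]
      by_cases hguard : bM t (t + 1) = 1
      · -- t + 1 is prime: multiply every multiple
        have hp : (t + 1).Prime := (bM_prime_iff t ht).mp hguard
        rw [hgets, if_pos (by simp [hguard])]
        have hstep : (fun (r : List Int) (j : Int) =>
            PySem.List.pySetD r j (PySem.List.pyGetD r j 0 * ((t : Int) + 1)))
            = updStep (fun _ _ => true) (fun old _ => old * ((t : Int) + 1)) := by
          funext r j
          simp [updStep]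
        rw [hstep]
        set js := PySem.List.pyRange ((t : Int) + 1) ((L : Int) + 1) ((t : Int) + 1) with hjs
        have hspos : (0 : Int) < (t : Int) + 1 := by omega
        have hmem : ∀ j ∈ js, 0 ≤ j ∧ j < (prev.length : Int) := by
          intro j hj
          rw [hjs, PySem.List.mem_pyRange_iff_of_pos hspos] at hj
          rw [hlen]
          push_cast
          omega
        apply List.ext_getElem
        · rw [length_foldl_updStep, hlen]; simp
        · intro i h1 h2
          have hiL : i < L + 1 := by rw [length_foldl_updStep, hlen] at h1; exact h1
          rw [← List.getD_eq_getElem _ 0 h1,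
            getD_foldl_updStep _ _ js (nodup_pyRange_pos _ _ hspos) prev hmem i]
          have hgetprev : prev.getD i 0 = bM t i := by
            rw [List.getD_eq_getElem _ 0 (by omega)]
            simp [hprev, hiL]
          have hmem_iff : ((i : Int) ∈ js) ↔ ((t + 1) ∣ i ∧ 1 ≤ i) := by
            rw [hjs, PySem.List.mem_pyRange_iff_of_pos hspos]
            constructor
            · rintro ⟨hge, hlt2, hdvd⟩
              have hdvd2 : ((t : Int) + 1) ∣ (i : Int) := by
                simpa using dvd_add hdvd (dvd_refl ((t : Int) + 1))
              have : ((t + 1 : Nat) : Int) ∣ (i : Int) := by push_cast; exact_mod_cast hdvd2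
              exact ⟨by exact_mod_cast this, by omega⟩
            · rintro ⟨hdvd, hge1⟩
              have hle : t + 1 ≤ i := Nat.le_of_dvd (by omega) hdvd
              have hdvd2 : ((t : Int) + 1) ∣ (i : Int) := by
                have : ((t + 1 : Nat) : Int) ∣ ((i : Nat) : Int) := Int.natCast_dvd_natCast.mpr hdvd
                push_cast at this; exact this
              refine ⟨by push_cast; omega, by push_cast; omega, ?_⟩
              exact dvd_sub hdvd2 dvd_rfl
          simp only [if_true]
          rw [List.getElem_map, List.getElem_range]
          by_cases hin : (t + 1) ∣ i ∧ 1 ≤ i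
          · rw [if_pos (hmem_iff.mpr hin), hgetprev]
            unfold bM
            rw [if_neg (by omega), if_neg (by omega),
              filter_le_succ_prod t i hin.2 hp, if_pos hin.1]
            push_cast
            ring
          · rw [if_neg (fun hc => hin (hmem_iff.mp hc)), hgetprev]
            unfold bM
            rcases Nat.eq_zero_or_pos i with rfl | hi1
            · simp
            · rw [if_neg (by omega), if_neg (by omega),
                filter_le_succ_prod t i hi1 hp, if_neg (fun hc => hin ⟨hc, hi1⟩)]
      · -- t + 1 is composite: nothing happens
        rw [hgets, if_neg (by simp [hguard])]
        apply List.map_congr_left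
        intro j hj
        unfold bM
        rcases Nat.eq_zero_or_pos j with rfl | hj1
        · simp
        · rw [if_neg (by omega), if_neg (by omega)]
          congr 1
          apply Finset.prod_congr _ (fun _ _ => rfl)
          ext q
          simp only [Finset.mem_filter, Nat.mem_primeFactors]
          constructor
          · rintro ⟨hq, hle⟩
            exact ⟨hq, by omega⟩
          · rintro ⟨⟨hq, hqd, hj0⟩, hle⟩
            refine ⟨⟨hq, hqd, hj0⟩, ?_⟩
            rcases Nat.lt_or_ge q (t + 1) with h | h
            · omega
            · exfalso
              have hq1 : q = t + 1 := by omega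
              exact hguard ((bM_prime_iff t ht).mpr (hq1 ▸ hq))

def radSpec (j : Nat) : Int := if j = 0 then 0 else ((∏ q ∈ j.primeFactors, q : ℕ) : Int)

lemma bM_top (L j : Nat) (hj : j ≤ L) : bM L j = radSpec j := by
  unfold bM radSpec
  rcases Nat.eq_zero_or_pos j with rfl | hj1
  · simp
  · rw [if_neg (by omega), if_neg (by omega)]
    congr 2
    apply Finset.filter_true_of_mem
    intro q hq
    simp only [Nat.mem_primeFactors] at hq
    exact le_trans (Nat.le_of_dvd hj1 hq.2.1) hj

def spfM (s j : Nat) : Nat := if 2 ≤ j ∧ j.minFac ≤ s ∧ j.minFac ^ 2 ≤ j then j.minFac else j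

lemma minFac_lt_of_cond {s j : Nat} (h : 2 ≤ j ∧ j.minFac ≤ s ∧ j.minFac ^ 2 ≤ j) :
    j.minFac < j := by
  have h2 : 2 ≤ j.minFac := (Nat.minFac_prime (by omega)).two_le
  nlinarith [h.2.2]

-- pointwise effect of one outer sieve iteration i = s + 1
lemma spfM_step (s t : Nat) (hp : (s + 1).Prime)
    (hmem : Prop) (hmem_iff : hmem ↔ (s + 1) ^ 2 ≤ t ∧ (s + 1) ∣ t) [Decidable hmem] :
    (if hmem then (if spfM s t = t then (s + 1) else spfM s t) else spfM s t) = spfM (s + 1) t := by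
  by_cases hcond : 2 ≤ t ∧ t.minFac ≤ s ∧ t.minFac ^ 2 ≤ t
  · have hne : spfM s t ≠ t := by
      rw [spfM, if_pos hcond]; exact Nat.ne_of_lt (minFac_lt_of_cond hcond)
    have hs : spfM s t = t.minFac := by rw [spfM, if_pos hcond]
    have hs1 : spfM (s + 1) t = t.minFac := by
      rw [spfM, if_pos ⟨hcond.1, by omega, hcond.2.2⟩]
    split_ifs with h1 h2 <;> simp_all
  · have hs : spfM s t = t := by rw [spfM, if_neg hcond]
    rw [hs]
    by_cases hm : hmem
    · obtain ⟨hsq, hdvd⟩ := hmem_iff.mp hm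
      have ht2 : 2 ≤ t := by nlinarith [hp.two_le]
      have hmf_le : t.minFac ≤ s + 1 := Nat.minFac_le_of_dvd hp.two_le hdvd
      have hmf_eq : t.minFac = s + 1 := by
        by_contra hne
        have h1 : t.minFac ≤ s := by omega
        have h2 : 2 ≤ t.minFac := (Nat.minFac_prime (by omega)).two_le
        exact hcond ⟨ht2, h1, by nlinarith⟩
      have : spfM (s + 1) t = t.minFac := by
        rw [spfM, if_pos ⟨ht2, by omega, by rw [hmf_eq]; exact hsq⟩]
      simp [hm, this, hmf_eq]
    · rw [if_neg hm, spfM]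
      rw [if_neg]
      rintro ⟨ht2, hle, hsq⟩
      have h2 : 2 ≤ t.minFac := (Nat.minFac_prime (by omega)).two_le
      by_cases h1 : t.minFac ≤ s
      · exact hcond ⟨ht2, h1, hsq⟩
      · have hmf_eq : t.minFac = s + 1 := by omega
        exact hm (hmem_iff.mpr ⟨by rw [← hmf_eq]; exact hsq, by rw [← hmf_eq]; exact Nat.minFac_dvd t⟩)

-- when nothing is marked: processing a composite i = s + 1 leaves the model unchanged
lemma spfM_step_comp (s t : Nat) (hnp : ¬ (s + 1).Prime) : spfM (s + 1) t = spfM s t := by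
  by_cases hcond : 2 ≤ t ∧ t.minFac ≤ s ∧ t.minFac ^ 2 ≤ t
  · rw [spfM, spfM, if_pos hcond, if_pos ⟨hcond.1, by omega, hcond.2.2⟩]
  · rw [spfM, spfM, if_neg hcond, if_neg]
    rintro ⟨ht2, hle, hsq⟩
    by_cases h1 : t.minFac ≤ s
    · exact hcond ⟨ht2, h1, hsq⟩
    · have hmf_eq : t.minFac = s + 1 := by
        have := (Nat.minFac_prime (show t ≠ 1 by omega)).two_le
        omega
      exact hnp (hmf_eq ▸ Nat.minFac_prime (show t ≠ 1 by omega))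

lemma spfM_guard (s : Nat) (hs : 1 ≤ s) : spfM s (s + 1) = s + 1 ↔ (s + 1).Prime := by
  constructor
  · intro h
    by_contra hnp
    have h0 : 0 < s + 1 := by omega
    have hsq : (s + 1).minFac ^ 2 ≤ s + 1 := Nat.minFac_sq_le_self h0 hnp
    have h2 : 2 ≤ (s + 1).minFac := (Nat.minFac_prime (by omega)).two_le
    have hlt : (s + 1).minFac < s + 1 := by nlinarith
    rw [spfM, if_pos ⟨by omega, by omega, hsq⟩] at h
    omega
  · intro hp
    rw [spfM, if_neg]
    rintro ⟨_, hle, _⟩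
    rw [hp.minFac_eq] at hle
    omega

lemma spfM_one (L : Nat) :
    PySem.List.pyRange 0 ((L : Int) + 1) 1 = (List.range (L + 1)).map (fun j => (spfM 1 j : Int)) := by
  have h : ((L : Int) + 1) = ((L + 1 : Nat) : Int) := by push_cast; ring
  rw [h, PySem.List.pyRange_zero_natCast]
  apply List.map_congr_left
  intro j _
  have : spfM 1 j = j := by
    rw [spfM, if_neg]
    rintro ⟨hj2, hle, _⟩
    have := (Nat.minFac_prime (show j ≠ 1 by omega)).two_le
    omega
  rw [this]

lemma spf_phase (L : Nat) : ∀ s : Nat, 1 ≤ s → s ≤ Nat.sqrt L →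
    (PySem.List.pyRange 2 ((s : Int) + 1) 1).foldl
      (fun spf i =>
        if PySem.List.pyGetD spf i 0 == i then
          (PySem.List.pyRange (i * i) ((L : Int) + 1) i).foldl
            (fun spf j =>
              if PySem.List.pyGetD spf j 0 == j then PySem.List.pySetD spf j i else spf) spf
        else spf)
      (PySem.List.pyRange 0 ((L : Int) + 1) 1)
    = (List.range (L + 1)).map (fun j => (spfM s j : Int)) := by
  intro s
  induction s with
  | zero => omega
  | succ s ih =>
    intro _ hsL
    rcases Nat.eq_zero_or_pos s with rfl | hs
    · rw [show ((1 : Nat) : Int) + 1 = 2 by norm_num, PySem.List.pyRange_one_eq_nil le_rfl]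
      exact spfM_one L
    · have hsqL : s + 1 ≤ L := le_trans hsL (Nat.sqrt_le_self L)
      have hcast : ((s + 1 : Nat) : Int) + 1 = ((s : Int) + 1) + 1 := by push_cast; ring
      have hpeel : PySem.List.pyRange 2 (((s + 1 : Nat) : Int) + 1) 1
          = PySem.List.pyRange 2 ((s : Int) + 1) 1 ++ [(s : Int) + 1] := by
        rw [hcast]; exact PySem.List.pyRange_one_succ_right (by omega)
      rw [hpeel, List.foldl_append, ih hs (by omega)]
      set prev := (List.range (L + 1)).map (fun j => (spfM s j : Int)) with hprev
      have hlen : prev.length = L + 1 := by simp [hprev]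
      simp only [List.foldl_cons, List.foldl_nil]
      have hp0 : (0 : Int) ≤ (s : Int) + 1 := by omega
      have hplt : (s : Int) + 1 < (prev.length : Int) := by rw [hlen]; push_cast; omega
      have htn : ((s : Int) + 1).toNat = s + 1 := by omega
      have hgets : PySem.List.pyGetD prev ((s : Int) + 1) 0 = ((spfM s (s + 1) : Nat) : Int) := by
        rw [PySem.List.pyGetD_eq_getElem prev 0 hp0 hplt]
        simp [hprev, htn]
      by_cases hguard : spfM s (s + 1) = s + 1
      · -- i = s + 1 is unmarked, hence prime: mark its multiples from (s+1)^2 on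
        have hp : (s + 1).Prime := (spfM_guard s hs).mp hguard
        rw [hgets, if_pos (by simp [hguard])]
        have hstep : (fun (spf : List Int) (j : Int) =>
            if PySem.List.pyGetD spf j 0 == j then PySem.List.pySetD spf j ((s : Int) + 1) else spf)
            = updStep (fun old j => old == j) (fun _ _ => (s : Int) + 1) := by
          funext spf j
          simp [updStep]
        rw [hstep]
        set js := PySem.List.pyRange (((s : Int) + 1) * ((s : Int) + 1)) ((L : Int) + 1) ((s : Int) + 1) with hjs
        have hspos : (0 : Int) < (s : Int) + 1 := by omega
        have hmem : ∀ j ∈ js, 0 ≤ j ∧ j < (prev.length : Int) := by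
          intro j hj
          rw [hjs, PySem.List.mem_pyRange_iff_of_pos hspos] at hj
          rw [hlen]
          push_cast
          constructor
          · nlinarith [hj.1]
          · omega
        apply List.ext_getElem
        · rw [length_foldl_updStep, hlen]; simp
        · intro i h1 h2
          have hiL : i < L + 1 := by rw [length_foldl_updStep, hlen] at h1; exact h1
          rw [← List.getD_eq_getElem _ 0 h1,
            getD_foldl_updStep _ _ js (nodup_pyRange_pos _ _ hspos) prev hmem i]
          have hgetprev : prev.getD i 0 = ((spfM s i : Nat) : Int) := by
            rw [List.getD_eq_getElem _ 0 (by omega)]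
            simp [hprev, hiL]
          have hmem_iff : ((i : Int) ∈ js) ↔ ((s + 1) ^ 2 ≤ i ∧ (s + 1) ∣ i) := by
            rw [hjs, PySem.List.mem_pyRange_iff_of_pos hspos]
            constructor
            · rintro ⟨hge, hlt2, hdvd⟩
              have hdvd2 : ((s : Int) + 1) ∣ (i : Int) := by
                have h1 : ((s : Int) + 1) ∣ ((s : Int) + 1) * ((s : Int) + 1) := dvd_mul_left _ _
                simpa using dvd_add hdvd h1
              have hd : ((s + 1 : Nat) : Int) ∣ ((i : Nat) : Int) := by push_cast; exact_mod_cast hdvd2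
              refine ⟨?_, by exact_mod_cast hd⟩
              have : ((s + 1 : Nat) : Int) * ((s + 1 : Nat) : Int) ≤ (i : Int) := by push_cast; nlinarith [hge]
              have hnat : (s + 1) * (s + 1) ≤ i := by exact_mod_cast this
              nlinarith [hnat]
            · rintro ⟨hsq, hdvd⟩
              have hd2 : ((s : Int) + 1) ∣ (i : Int) := by
                have : ((s + 1 : Nat) : Int) ∣ ((i : Nat) : Int) := Int.natCast_dvd_natCast.mpr hdvd
                push_cast at this; exact this
              have hsq2 : ((s : Int) + 1) * ((s : Int) + 1) ≤ (i : Int) := by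
                have : ((s + 1) * (s + 1) : Nat) ≤ i := by nlinarith [hsq]
                exact_mod_cast this
              refine ⟨hsq2, by push_cast; omega, ?_⟩
              exact dvd_sub hd2 (dvd_mul_left _ _)
          rw [hgetprev]
          have hrhs : ((List.range (L + 1)).map (fun j => (spfM (s + 1) j : Int)))[i]'h2
              = ((spfM (s + 1) i : Nat) : Int) := by simp [hiL]
          rw [hrhs, ← spfM_step s i hp ((i : Int) ∈ js) hmem_iff]
          by_cases hin : (i : Int) ∈ js
          · rw [if_pos hin, if_pos hin]
            by_cases heq : spfM s i = i
            · rw [if_pos (by simp [heq]), if_pos heq]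
              push_cast; ring
            · rw [if_neg (by simpa using fun hc => heq (by exact_mod_cast hc)), if_neg heq]
          · rw [if_neg hin, if_neg hin]
      · -- i = s + 1 is already marked, hence composite: skipped, model unchanged
        have hnp : ¬ (s + 1).Prime := fun hc => hguard ((spfM_guard s hs).mpr hc)
        rw [hgets, if_neg]
        · apply List.map_congr_left
          intro j _
          rw [spfM_step_comp s j hnp]
        · simp
          intro hc
          exact hguard (by exact_mod_cast hc)

lemma spfM_sqrt (L j : Nat) (h2 : 2 ≤ j) (hjL : j ≤ L) : spfM (Nat.sqrt L) j = j.minFac := by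
  by_cases hp : j.Prime
  · rw [spfM]
    split_ifs with h
    · rfl
    · exact hp.minFac_eq.symm
  · have hsq : j.minFac ^ 2 ≤ j := Nat.minFac_sq_le_self (by omega) hp
    have hle : j.minFac ≤ Nat.sqrt L := Nat.le_sqrt.mpr (by nlinarith [hsq])
    rw [spfM, if_pos ⟨h2, hle, hsq⟩]

def PA (m : Nat) (seen : List Int) : Int :=
  ((∏ q ∈ m.primeFactors.filter (fun q : Nat => (q : Int) ∉ seen), q : ℕ) : Int)

lemma pf_div_iff (m q : Nat) (hm : 2 ≤ m) (hq : q.Prime) (hne : q ≠ m.minFac) :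
    q ∈ (m / m.minFac).primeFactors ↔ q ∈ m.primeFactors := by
  have hpd : m.minFac ∣ m := Nat.minFac_dvd m
  have hp : m.minFac.Prime := Nat.minFac_prime (by omega)
  have hmul : m.minFac * (m / m.minFac) = m := Nat.mul_div_cancel' hpd
  have hm'pos : 0 < m / m.minFac := Nat.div_pos (Nat.minFac_le (by omega)) (Nat.minFac_pos m)
  simp only [Nat.mem_primeFactors]
  constructor
  · rintro ⟨_, hd, _⟩
    exact ⟨hq, dvd_trans hd (Nat.div_dvd_of_dvd hpd), by omega⟩
  · rintro ⟨_, hd, _⟩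
    refine ⟨hq, ?_, hm'pos.ne'⟩
    have : q ∣ m.minFac * (m / m.minFac) := by rw [hmul]; exact hd
    rcases (Nat.Prime.dvd_mul hq).mp this with h | h
    · exact absurd ((Nat.prime_dvd_prime_iff_eq hq hp).mp h) hne
    · exact h

lemma PA_in (m : Nat) (hm : 2 ≤ m) (seen : List Int) (hin : ((m.minFac : Nat) : Int) ∈ seen) :
    PA m seen = PA (m / m.minFac) seen := by
  unfold PA
  congr 1
  apply Finset.prod_congr _ (fun _ _ => rfl)
  ext q
  simp only [Finset.mem_filter]
  constructor
  · rintro ⟨hmem, hq⟩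
    have hqp : q.Prime := (Nat.mem_primeFactors.mp hmem).1
    have hne : q ≠ m.minFac := fun hc => hq (hc ▸ hin)
    exact ⟨(pf_div_iff m q hm hqp hne).mpr hmem, hq⟩
  · rintro ⟨hmem, hq⟩
    have hqp : q.Prime := (Nat.mem_primeFactors.mp hmem).1
    have hne : q ≠ m.minFac := fun hc => hq (hc ▸ hin)
    exact ⟨(pf_div_iff m q hm hqp hne).mp hmem, hq⟩

lemma PA_not_in (m : Nat) (hm : 2 ≤ m) (seen : List Int) (hnin : ((m.minFac : Nat) : Int) ∉ seen) :
    PA m seen = ((m.minFac : Nat) : Int)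
      * PA (m / m.minFac) (PySem.Set.add seen ((m.minFac : Nat) : Int)) := by
  unfold PA
  have hmem : m.minFac ∈ m.primeFactors.filter (fun q : Nat => (q : Int) ∉ seen) := by
    simp only [Finset.mem_filter, Nat.mem_primeFactors]
    exact ⟨⟨Nat.minFac_prime (by omega), Nat.minFac_dvd m, by omega⟩, hnin⟩
  rw [← Finset.mul_prod_erase _ _ hmem]
  have hset : (m.primeFactors.filter (fun q : Nat => (q : Int) ∉ seen)).erase m.minFac
      = (m / m.minFac).primeFactors.filter
          (fun q : Nat => (q : Int) ∉ PySem.Set.add seen ((m.minFac : Nat) : Int)) := by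
    ext q
    simp only [Finset.mem_erase, Finset.mem_filter, PySem.Set.mem_add]
    constructor
    · rintro ⟨hne, hmem2, hq⟩
      have hqp : q.Prime := (Nat.mem_primeFactors.mp hmem2).1
      refine ⟨(pf_div_iff m q hm hqp hne).mpr hmem2, ?_⟩
      rintro (h | h)
      · exact hq h
      · exact hne (by exact_mod_cast h)
    · rintro ⟨hmem2, hq⟩
      have hqp : q.Prime := (Nat.mem_primeFactors.mp hmem2).1
      have hne : q ≠ m.minFac := fun hc => hq (Or.inr (by exact_mod_cast hc))
      exact ⟨hne, (pf_div_iff m q hm hqp hne).mp hmem2, fun h => hq (Or.inl h)⟩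
  rw [hset]
  push_cast
  ring

lemma factorLoop_spec (L : Nat) (spf : List Int)
    (hspf : spf = (List.range (L + 1)).map (fun j => (spfM (Nat.sqrt L) j : Int))) :
    ∀ m : Nat, 1 ≤ m → m ≤ L → ∀ (r : List Int) (n : Int) (seen : PySem.Set Int), 0 ≤ n →
      (sieveRadFactorLoop spf r n (m : Int) seen).length = r.length ∧
      ∀ t : Nat, (sieveRadFactorLoop spf r n (m : Int) seen).getD t 0 =
        if (t : Int) = n then r.getD t 0 * PA m seen else r.getD t 0 := by
  intro m
  induction m using Nat.strong_induction_on with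
  | _ m ih =>
    intro hm1 hmL r n seen hn0
    rcases Nat.lt_or_ge m 2 with hm2 | hm2
    · -- m = 1 : the loop does not run
      have hm : m = 1 := by omega
      subst hm
      rw [sieveRadFactorLoop, dif_neg (by simp)]
      refine ⟨rfl, fun t => ?_⟩
      have hPA1 : PA 1 seen = 1 := by unfold PA; simp
      rw [hPA1, mul_one, ite_self]
    · -- m ≥ 2 : one division step
      have hmf2 : 2 ≤ m.minFac := (Nat.minFac_prime (by omega)).two_le
      have hpval : PySem.List.pyGetD spf (m : Int) 0 = ((m.minFac : Nat) : Int) := by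
        have hlt : (m : Int) < (spf.length : Int) := by rw [hspf]; simp; push_cast; omega
        rw [PySem.List.pyGetD_eq_getElem spf 0 (by omega) hlt]
        have htn : ((m : Int)).toNat = m := by omega
        simp [hspf, htn, show m < L + 1 by omega, spfM_sqrt L m hm2 hmL]
      have hdiv : PySem.Int.floordiv (m : Int) ((m.minFac : Nat) : Int)
          = ((m / m.minFac : Nat) : Int) := PySem.Int.floordiv_natCast m m.minFac
      have hm'1 : 1 ≤ m / m.minFac :=
        Nat.div_pos (Nat.minFac_le (by omega)) (Nat.minFac_pos m)
      have hm'lt : m / m.minFac < m := Nat.div_lt_self (by omega) (by omega)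
      have hm'L : m / m.minFac ≤ L := by omega
      rw [sieveRadFactorLoop]
      simp only [hpval]
      rw [dif_pos (show (1 : Int) < (m : Int) by exact_mod_cast hm2),
        dif_pos (show (2 : Int) ≤ ((m.minFac : Nat) : Int) by exact_mod_cast hmf2), hdiv]
      by_cases hcont : PySem.Set.contains seen ((m.minFac : Nat) : Int) = true
      · rw [if_pos hcont]
        obtain ⟨hlen', hform⟩ := ih (m / m.minFac) hm'lt hm'1 hm'L r n seen hn0
        refine ⟨hlen', fun t => ?_⟩
        rw [hform t,
          PA_in m hm2 seen ((PySem.Set.contains_iff seen _).mp hcont)]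
      · rw [if_neg hcont]
        have hnin : ((m.minFac : Nat) : Int) ∉ seen :=
          fun hmem => hcont ((PySem.Set.contains_iff seen _).mpr hmem)
        set r' := PySem.List.pySetD r n (PySem.List.pyGetD r n 0 * ((m.minFac : Nat) : Int))
          with hr'def
        obtain ⟨hlen', hform⟩ := ih (m / m.minFac) hm'lt hm'1 hm'L r' n
          (PySem.Set.add seen ((m.minFac : Nat) : Int)) hn0
        have hlenr' : r'.length = r.length := by rw [hr'def, PySem.List.length_pySetD]
        have hr' : ∀ s : Nat, r'.getD s 0 =
            if (s : Int) = n ∧ s < r.length then r.getD s 0 * ((m.minFac : Nat) : Int)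
            else r.getD s 0 := by
          intro s
          rw [hr'def, PySem.List.pySetD_of_nonneg _ _ hn0, getD_set_int]
          by_cases hs : (s : Int) = n
          · have hsn : s = n.toNat := by omega
            by_cases hlt : s < r.length
            · rw [if_pos ⟨hsn, hlt⟩, if_pos ⟨hs, hlt⟩]
              have hnlt : n < (r.length : Int) := by omega
              rw [PySem.List.pyGetD_eq_getElem r 0 hn0 hnlt,
                List.getD_eq_getElem r 0 (show s < r.length from hlt)]
              simp [hsn]
            · rw [if_neg (by omega), if_neg (by push_neg; intro _; omega)]
          · have h1 : ¬(s = n.toNat ∧ s < r.length) := by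
              rintro ⟨h, _⟩; exact hs (by omega)
            have h2 : ¬((s : Int) = n ∧ s < r.length) := by
              rintro ⟨h, _⟩; exact hs h
            rw [if_neg h1, if_neg h2]
        refine ⟨by rw [hlen', hlenr'], fun t => ?_⟩
        rw [hform t]
        by_cases ht : (t : Int) = n
        · rw [if_pos ht, if_pos ht, hr' t]
          by_cases htl : t < r.length
          · rw [if_pos ⟨ht, htl⟩,
              PA_not_in m hm2 seen hnin]
            ring
          · rw [if_neg (by push_neg; intro _; omega)]
            have h0 : r.getD t 0 = 0 := List.getD_eq_default _ _ (by omega)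
            rw [h0, zero_mul, zero_mul]
        · rw [if_neg ht, if_neg ht, hr' t, if_neg (by push_neg; intro hc; exact absurd hc ht)]

def A2M (k j : Nat) : Int :=
  if j = 0 then 0 else if j < k then ((∏ q ∈ j.primeFactors, q : ℕ) : Int) else 1

lemma PA_empty (m : Nat) : PA m PySem.Set.empty = ((∏ q ∈ m.primeFactors, q : ℕ) : Int) := by
  unfold PA
  congr 2
  apply Finset.filter_true_of_mem
  intro q _
  simp [PySem.Set.empty]

lemma a2_phase (L : Nat) (spf : List Int)
    (hspf : spf = (List.range (L + 1)).map (fun j => (spfM (Nat.sqrt L) j : Int))) :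
    ∀ k : Nat, 2 ≤ k → k ≤ L + 1 →
    (PySem.List.pyRange 2 (k : Int) 1).foldl
      (fun r n => sieveRadFactorLoop spf r n n PySem.Set.empty)
      ((List.range (L + 1)).map (fun j => if j = 0 then (0 : Int) else 1))
    = (List.range (L + 1)).map (fun j => A2M k j) := by
  intro k
  induction k with
  | zero => omega
  | succ k ih =>
    intro _ hkL
    rcases Nat.lt_or_ge k 2 with hk2 | hk2
    · -- k + 1 = 2 : empty range
      have hk : k = 1 := by omega
      subst hk
      rw [show ((2 : Nat) : Int) = 2 by norm_num, PySem.List.pyRange_one_eq_nil le_rfl]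
      apply List.map_congr_left
      intro j _
      unfold A2M
      rcases Nat.eq_zero_or_pos j with rfl | hj
      · simp
      · rcases Nat.lt_or_ge j 2 with hj2 | hj2
        · have : j = 1 := by omega
          subst this
          simp
        · rw [if_neg (show ¬ j = 0 by omega), if_neg (show ¬ j = 0 by omega),
            if_neg (show ¬ j < 1 + 1 by omega)]
    · -- peel the last iteration n = k
      have hpeel : PySem.List.pyRange 2 ((k + 1 : Nat) : Int) 1
          = PySem.List.pyRange 2 (k : Int) 1 ++ [(k : Int)] := by
        rw [show ((k + 1 : Nat) : Int) = (k : Int) + 1 by push_cast; ring]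
        exact PySem.List.pyRange_one_succ_right (by exact_mod_cast hk2)
      rw [hpeel, List.foldl_append, ih hk2 (by omega), List.foldl_cons, List.foldl_nil]
      set prev := (List.range (L + 1)).map (fun j => A2M k j) with hprev
      have hlen : prev.length = L + 1 := by simp [hprev]
      obtain ⟨hlen', hform⟩ := factorLoop_spec L spf hspf k (by omega) (by omega) prev
        (k : Int) PySem.Set.empty (by omega)
      apply List.ext_getElem
      · rw [hlen', hlen]; simp
      · intro i h1 h2
        have hiL : i < L + 1 := by rw [hlen', hlen] at h1; exact h1
        rw [← List.getD_eq_getElem _ 0 h1, hform i]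
        have hgetprev : prev.getD i 0 = A2M k i := by
          rw [List.getD_eq_getElem _ 0 (by omega)]
          simp [hprev, hiL]
        have hrhs : ((List.range (L + 1)).map (fun j => A2M (k + 1) j))[i]'h2
            = A2M (k + 1) i := by simp [hiL]
        rw [hrhs, hgetprev, PA_empty]
        by_cases hik : (i : Int) = (k : Int)
        · have hik2 : i = k := by exact_mod_cast hik
          rw [if_pos hik]
          obtain rfl := hik2
          unfold A2M
          rw [if_neg (show ¬ i = 0 by omega), if_neg (show ¬ i < i by omega),
            if_neg (show ¬ i = 0 by omega), if_pos (show i < i + 1 by omega)]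
          ring
        · have hik2 : i ≠ k := fun hc => hik (by exact_mod_cast hc)
          rw [if_neg hik]
          unfold A2M
          rcases Nat.eq_zero_or_pos i with rfl | hi
          · simp
          · rw [if_neg (show ¬ i = 0 by omega)]
            by_cases hlt : i < k
            · rw [if_pos hlt, if_neg (show ¬ i = 0 by omega),
                if_pos (show i < k + 1 by omega)]
            · rw [if_neg hlt, if_neg (show ¬ i = 0 by omega),
                if_neg (show ¬ i < k + 1 by omega)]

lemma A_eq (L : Nat) : sieve_rad (L : Int) = (List.range (L + 1)).map radSpec := by
  have ht1 : ((L : Int) + 1).toNat = L + 1 := by omega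
  have ht2 : ((L : Int)).toNat = L := by omega
  simp only [sieve_rad, ht1, ht2]
  rw [init_eq]
  rcases Nat.eq_zero_or_pos L with rfl | hL
  · rw [show ((Nat.sqrt 0 : Nat) : Int) + 1 = 1 by norm_num,
      PySem.List.pyRange_one_eq_nil (show (1 : Int) ≤ 2 by norm_num),
      show ((0 : Nat) : Int) + 1 = 1 by norm_num,
      PySem.List.pyRange_one_eq_nil (show (1 : Int) ≤ 2 by norm_num)]
    simp [radSpec]
  · have hs1 : 1 ≤ Nat.sqrt L := Nat.le_sqrt.mpr (by omega)
    rw [spf_phase L (Nat.sqrt L) hs1 le_rfl,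
      show ((L : Int) + 1) = ((L + 1 : Nat) : Int) by push_cast; ring,
      a2_phase L _ rfl (L + 1) (by omega) le_rfl]
    apply List.map_congr_left
    intro j hj
    simp only [List.mem_range] at hj
    unfold A2M radSpec
    rcases Nat.eq_zero_or_pos j with rfl | hj1
    · simp
    · rw [if_neg (show ¬ j = 0 by omega), if_pos (show j < L + 1 by omega),
        if_neg (show ¬ j = 0 by omega)]

lemma B_eq (L : Nat) : sieve_rad_alt (L : Int) = (List.range (L + 1)).map radSpec := by
  have hto : ((L : Int) + 1).toNat = L + 1 := by omega
  simp only [sieve_rad_alt, hto]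
  rw [init_eq]
  rcases Nat.eq_zero_or_pos L with rfl | hL
  · rw [show ((0 : Nat) : Int) + 1 = 1 by norm_num, PySem.List.pyRange_one_eq_nil (by norm_num)]
    simp [radSpec]
  · rw [b_phase L L hL le_rfl]
    exact List.map_congr_left (fun j hj => bM_top L j (by simp at hj; omega))

-- ===== VERDICT (by name: the statement is the Claim_ definition above) =====
theorem sieve_rad_spec : Claim_equal_sieve_rad := by
  intro limit _ hpre
  unfold Spec_sieve_rad
  obtain ⟨L, rfl⟩ := Int.eq_ofNat_of_zero_le hpre
  rw [A_eq, B_eq]
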